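-- pv_equiv track=rewrite | github.com/Nau-stack-110/tuto_python | exercice/reverse_word_phrase.py | rev_alnum
-- ===== SOURCE A (Python) =====
-- def rev_alnum(word):
--     letters = [c for c in word if c.isalnum()]
--     letters.reverse()
--     res = list(word)
--     j = 0
--     for i, c in enumerate(word):
--         if c.isalnum():
--             res[i] = letters[j]
--             j += 1
--     return "".join(res)
-- ===== SOURCE B (Python) =====
-- def rev_alnum(word):
--     # Single forward pass pulling replacements lazily from a reversed iterator
--     # (forward/backward two-cursor scan; no letters list is materialised).
--     it = iter(reversed(word))
--     out = []
--     for c in word: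
--         if c.isalnum():
--             y = next(it)
--             while not y.isalnum():
--                 y = next(it)
--             out.append(y)
--         else:
--             out.append(c)
--     return "".join(out)
-- ===== Notes on version B (the rewrite author's own statement) =====
-- stated objective: alternative
-- what changed: B drops A's three-phase build-letters-list / reverse-it / index-fill-with-counter-j scheme for a single forward pass that pulls each replacement lazily from a reversed iterator (a forward/backward two-cursor scan), never materialising a letters list or mutating a copy by index.
import Mathlib
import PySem

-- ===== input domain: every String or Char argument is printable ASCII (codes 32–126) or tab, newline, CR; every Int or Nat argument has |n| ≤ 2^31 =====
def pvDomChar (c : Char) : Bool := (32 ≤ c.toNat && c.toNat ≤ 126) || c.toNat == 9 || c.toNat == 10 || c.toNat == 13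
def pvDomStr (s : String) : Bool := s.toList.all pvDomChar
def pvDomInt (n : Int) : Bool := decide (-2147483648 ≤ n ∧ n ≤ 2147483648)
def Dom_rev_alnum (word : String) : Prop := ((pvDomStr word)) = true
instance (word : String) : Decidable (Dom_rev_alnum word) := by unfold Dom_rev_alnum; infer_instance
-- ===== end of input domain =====

-- B replaces A's build-reverse-then-index-fill with a single forward pass pulling
-- replacements lazily from a reversed iterator (alternative decomposition, same cost).

-- ===== PORT A =====
-- one loop step of A: `if c.isalnum(): res[i] = letters[j]; j += 1`
-- (letters[j] is always in range in A — there are exactly as many alnum positions as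
-- letters — so the Python IndexError branch is unreachable; `getD` is used for totality)
def revAStep (letters : List Char) (st : List Char × Nat) (ic : Int × Char) : List Char × Nat :=
  if PySem.Chars.isalnum ic.2 then (st.1.set ic.1.toNat (letters.getD st.2 ' '), st.2 + 1) else st

def rev_alnum (word : String) : String :=
  let letters := (word.toList.filter (fun c => PySem.Chars.isalnum c)).reverse
  let st := (PySem.List.enumerate word.toList 0).foldl (revAStep letters) (word.toList, 0)
  String.mk st.1

-- ===== PORT B =====
-- B's loop: for each char of the word, if alnum pull the next alnum char from the
-- reversed iterator `ys`, else keep the char.  The `[]` branch of the match is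
-- Python's StopIteration — unreachable, since the reversed word holds exactly as
-- many alnum chars as the word itself.
def bAux : List Char → List Char → List Char
  | [], _ => []
  | x :: xs, ys =>
    if PySem.Chars.isalnum x then
      match ys.dropWhile (fun y => !PySem.Chars.isalnum y) with
      | y :: ys' => y :: bAux xs ys'
      | [] => []
    else
      x :: bAux xs ys

def rev_alnum_alt (word : String) : String :=
  String.mk (bAux word.toList word.toList.reverse)

-- ===== PRECONDITION & SPEC =====
def Spec_rev_alnum (word : String) (out : String) : Prop := out = rev_alnum_alt word
instance (word : String) (out : String) : Decidable (Spec_rev_alnum word out) := by unfold Spec_rev_alnum; infer_instance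

-- ===== CLAIM (what is proved, stated in full; the proofs are below) =====
def Claim_equal_rev_alnum : Prop := ∀ (word : String), Dom_rev_alnum word → Spec_rev_alnum word (rev_alnum word)

-- ===== LEMMAS AND PROOFS =====

-- common reference: replace each alnum char of the first list by successive heads of the second
def fillS : List Char → List Char → List Char
  | [], _ => []
  | x :: xs, ls =>
    if PySem.Chars.isalnum x then ls.headD ' ' :: fillS xs ls.tail else x :: fillS xs ls

lemma foldA (letters : List Char) :
    ∀ (xs acc : List Char) (j : Nat),
      ((PySem.List.enumerate xs (acc.length : Int)).foldl (revAStep letters) (acc ++ xs, j)).1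
        = acc ++ fillS xs (letters.drop j) := by
  intro xs
  induction xs with
  | nil => intro acc j; simp [PySem.List.enumerate_nil, fillS]
  | cons x xs ih =>
    intro acc j
    rw [PySem.List.enumerate_cons, List.foldl_cons]
    by_cases hx : PySem.Chars.isalnum x
    · have h1 : revAStep letters (acc ++ x :: xs, j) ((acc.length : Int), x)
          = (acc ++ letters.getD j ' ' :: xs, j + 1) := by
        simp [revAStep, hx]
      have h2 := ih (acc ++ [letters.getD j ' ']) (j + 1)
      simp only [List.length_append, List.length_cons, List.length_nil,
        List.append_assoc, List.cons_append, List.nil_append] at h2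
      rw [h1]
      have : ((acc.length : Int) + 1) = ((acc.length + 1 : Nat) : Int) := by push_cast; ring
      rw [this, h2]
      simp [fillS, hx, List.tail_drop]
    · have h1 : revAStep letters (acc ++ x :: xs, j) ((acc.length : Int), x) = (acc ++ x :: xs, j) := by
        simp [revAStep, hx]
      have h2 := ih (acc ++ [x]) j
      simp only [List.length_append, List.length_cons, List.length_nil,
        List.append_assoc, List.cons_append, List.nil_append] at h2
      rw [h1]
      have : ((acc.length : Int) + 1) = ((acc.length + 1 : Nat) : Int) := by push_cast; ring
      rw [this, h2]
      simp [fillS, hx]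

lemma filter_dropWhile (ys : List Char) :
    ys.filter PySem.Chars.isalnum =
      (match ys.dropWhile (fun y => !PySem.Chars.isalnum y) with
       | [] => ([] : List Char)
       | y :: t => y :: t.filter PySem.Chars.isalnum) := by
  induction ys with
  | nil => rfl
  | cons y ys ih =>
    by_cases h : PySem.Chars.isalnum y <;>
      simp [h, ih]

lemma bAux_eq : ∀ (xs ys : List Char),
    xs.countP PySem.Chars.isalnum ≤ (ys.filter PySem.Chars.isalnum).length →
    bAux xs ys = fillS xs (ys.filter PySem.Chars.isalnum) := by
  intro xs
  induction xs with
  | nil => intro ys _; rfl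
  | cons x xs ih =>
    intro ys hlen
    by_cases hx : PySem.Chars.isalnum x
    · have hf := filter_dropWhile ys
      cases hd : ys.dropWhile (fun y => !PySem.Chars.isalnum y) with
      | nil =>
        rw [hd] at hf
        rw [hf] at hlen
        simp [hx] at hlen
      | cons y ys' =>
        rw [hd] at hf
        have hcount : xs.countP PySem.Chars.isalnum ≤ (ys'.filter PySem.Chars.isalnum).length := by
          rw [hf] at hlen
          simp [hx] at hlen
          omega
        simp only [bAux, hx, hd, if_true, hf, fillS]
        simp [ih ys' hcount]
    · have hcount : xs.countP PySem.Chars.isalnum ≤ (ys.filter PySem.Chars.isalnum).length := by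
        simp [hx] at hlen ⊢; omega
      simp only [bAux, hx, fillS]
      simp [ih ys hcount]

-- ===== VERDICT (by name: the statement is the Claim_ definition above) =====
theorem rev_alnum_spec : Claim_equal_rev_alnum := by
  intro word _
  unfold Spec_rev_alnum
  simp only [rev_alnum, rev_alnum_alt]
  set wl := word.toList with hwl
  have hA := foldA ((wl.filter (fun c => PySem.Chars.isalnum c)).reverse) wl [] 0
  simp only [List.nil_append, List.length_nil, Nat.cast_zero, List.drop_zero] at hA
  have hcnt : wl.countP PySem.Chars.isalnum ≤ (wl.reverse.filter PySem.Chars.isalnum).length := by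
    rw [List.filter_reverse]
    simp [List.countP_eq_length_filter]
  have hB := bAux_eq wl wl.reverse hcnt
  rw [hA, hB, List.filter_reverse]
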